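-- pv_equiv track=rewrite | github.com/d25037/trading25 | apps/bt/src/application/services/listed_market_targets.py | group_target_codes_by_canonical
-- ===== SOURCE A (Python) =====
-- from typing import Any, Iterable, Mapping
--
-- def group_target_codes_by_canonical(target_map: Mapping[str, str]) -> dict[str, tuple[str, ...]]:
--     grouped: dict[str, list[str]] = {}
--     for exact_code, canonical_code in target_map.items():
--         grouped.setdefault(canonical_code, []).append(exact_code)
--     return {
--         canonical_code: tuple(sorted(set(exact_codes)))
--         for canonical_code, exact_codes in grouped.items()
--     }
-- ===== SOURCE B (Python) =====
-- def group_target_codes_by_canonical(target_map):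
--     # One pass: maintain each group's tuple already sorted by inserting every
--     # exact code at its sorted position, so no per-group sorted(set(...)) pass is needed.
--     result: dict[str, tuple[str, ...]] = {}
--     for exact_code, canonical_code in target_map.items():
--         cur = result.get(canonical_code, ())
--         i = 0
--         while i < len(cur) and cur[i] < exact_code:
--             i += 1
--         result[canonical_code] = cur[:i] + (exact_code,) + cur[i:]
--     return result
-- ===== Notes on version B (the rewrite author's own statement) =====
-- stated objective: alternative
-- what changed: Replaces A's two-phase group-then-sorted(set(...))-per-group construction with a single pass that keeps every group's tuple sorted by splicing each exact code into its sorted position, with no set, no sorted() and no final rebuilding comprehension.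
import Mathlib
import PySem

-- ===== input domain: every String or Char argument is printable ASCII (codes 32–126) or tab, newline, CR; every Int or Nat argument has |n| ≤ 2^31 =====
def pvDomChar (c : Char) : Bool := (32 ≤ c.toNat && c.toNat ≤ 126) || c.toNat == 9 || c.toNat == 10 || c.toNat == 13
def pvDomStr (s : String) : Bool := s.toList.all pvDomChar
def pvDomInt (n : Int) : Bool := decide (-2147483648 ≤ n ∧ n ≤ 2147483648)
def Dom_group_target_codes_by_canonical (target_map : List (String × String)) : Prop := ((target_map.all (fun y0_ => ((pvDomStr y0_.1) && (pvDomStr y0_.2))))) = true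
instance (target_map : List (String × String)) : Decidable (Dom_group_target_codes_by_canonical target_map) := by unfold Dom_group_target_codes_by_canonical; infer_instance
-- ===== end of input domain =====

-- B replaces the group-then-sort-each-group construction by a single pass that keeps each
-- group sorted via positional insertion; equal results are proved on dict-shaped inputs.

-- ===== PORT A =====
def group_target_codes_by_canonical (target_map : List (String × String)) : List (String × List String) :=
  -- grouped.setdefault(canonical, []).append(exact)  ==  grouped[canonical] = grouped.get(canonical, []) + [exact]
  (target_map.foldl (fun (d : PySem.Dict String (List String)) p =>
      d.modify p.2 [] (fun xs => xs ++ [p.1])) PySem.Dict.empty).items.map (fun p => (p.1, PySem.List.sorted (PySem.Set.ofList p.2) (fun x => x)))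

-- ===== PORT B =====
-- the while-loop splice: cur[:i] + (exact,) + cur[i:] with i the first index with not (cur[i] < exact)
def pvSpliceSorted (cur : List String) (x : String) : List String :=
  match cur with
  | [] => [x]
  | y :: ys => if y < x then y :: pvSpliceSorted ys x else x :: y :: ys

def group_target_codes_by_canonical_alt (target_map : List (String × String)) : List (String × List String) :=
  (target_map.foldl
    (fun (d : PySem.Dict String (List String)) p =>
      d.insert p.2 (pvSpliceSorted (d.getD p.2 []) p.1)) PySem.Dict.empty).items

-- ===== PRECONDITION & SPEC =====
-- Pre_ excludes association lists with duplicate exact-code keys: they do not encode any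
-- Python dict (A's parameter is a Mapping, whose keys are unique), so the encoding is ambiguous there.
def Pre_group_target_codes_by_canonical (target_map : List (String × String)) : Prop :=
  (target_map.map (fun p => p.1)).Nodup
instance (target_map : List (String × String)) : Decidable (Pre_group_target_codes_by_canonical target_map) := by unfold Pre_group_target_codes_by_canonical; infer_instance
def pvWitness_group_target_codes_by_canonical : (List (String × String)) :=
  [("7203", "7203"), ("7203-5", "7203"), ("9984", "9984")]
def Spec_group_target_codes_by_canonical (target_map : List (String × String)) (out : List (String × List String)) : Prop := out = group_target_codes_by_canonical_alt target_map
instance (target_map : List (String × String)) (out : List (String × List String)) : Decidable (Spec_group_target_codes_by_canonical target_map out) := by unfold Spec_group_target_codes_by_canonical; infer_instance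

-- ===== CLAIM (what is proved, stated in full; the proofs are below) =====
def Claim_equal_group_target_codes_by_canonical : Prop := ∀ (target_map : List (String × String)), Dom_group_target_codes_by_canonical target_map → Pre_group_target_codes_by_canonical target_map → Spec_group_target_codes_by_canonical target_map (group_target_codes_by_canonical target_map)

-- ===== LEMMAS AND PROOFS =====

theorem pvSpliceSorted_perm (l : List String) (x : String) :
    (pvSpliceSorted l x).Perm (x :: l) := by
  induction l with
  | nil => simp [pvSpliceSorted]
  | cons y ys ih =>
    simp only [pvSpliceSorted]
    split_ifs
    · exact ((ih.cons y).trans (List.Perm.swap x y ys))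
    · exact List.Perm.refl _

theorem pvSpliceSorted_pairwise (l : List String) (x : String)
    (hp : l.Pairwise (· < ·)) (hx : x ∉ l) :
    (pvSpliceSorted l x).Pairwise (· < ·) := by
  induction l with
  | nil => simp [pvSpliceSorted]
  | cons y ys ih =>
    rw [List.pairwise_cons] at hp
    simp only [List.mem_cons, not_or] at hx
    simp only [pvSpliceSorted]
    split_ifs with hyx
    · refine List.pairwise_cons.mpr ⟨?_, ih hp.2 hx.2⟩
      intro z hz
      rcases List.mem_cons.mp (((pvSpliceSorted_perm ys x).mem_iff).mp hz) with h | h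
      · exact h ▸ hyx
      · exact hp.1 z h
    · have hxy : x < y := lt_of_le_of_ne (not_lt.mp hyx) hx.1
      refine List.pairwise_cons.mpr ⟨?_, List.pairwise_cons.mpr ⟨hp.1, hp.2⟩⟩
      intro z hz
      rcases List.mem_cons.mp hz with h | h
      · exact h ▸ hxy
      · exact hxy.trans (hp.1 z h)

theorem foldl_splice_invariant (xs acc : List String)
    (hacc : acc.Pairwise (· < ·)) (hnd : (acc ++ xs).Nodup) :
    (xs.foldl pvSpliceSorted acc).Perm (acc ++ xs) ∧
      (xs.foldl pvSpliceSorted acc).Pairwise (· < ·) := by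
  induction xs generalizing acc with
  | nil =>
    simp only [List.foldl_nil, List.append_nil]
    exact ⟨List.Perm.refl acc, hacc⟩
  | cons x t ih =>
    have hx : x ∉ acc := by
      intro h
      exact (List.nodup_append.mp hnd).2.2 x h x (List.mem_cons_self ..) rfl
    have hperm : (pvSpliceSorted acc x).Perm (x :: acc) := pvSpliceSorted_perm acc x
    have hpair : (pvSpliceSorted acc x).Pairwise (· < ·) := pvSpliceSorted_pairwise acc x hacc hx
    have hmid : (acc ++ x :: t).Perm (x :: (acc ++ t)) := List.perm_middle
    have hnd' : (pvSpliceSorted acc x ++ t).Nodup := by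
      refine ((hperm.append_right t).nodup_iff).mpr ?_
      exact (hmid.nodup_iff).mp hnd
    obtain ⟨p, q⟩ := ih (pvSpliceSorted acc x) hpair hnd'
    refine ⟨p.trans ?_, q⟩
    exact (hperm.append_right t).trans hmid.symm

theorem foldl_splice_eq_sorted_ofList (xs : List String) (hnd : xs.Nodup) :
    xs.foldl pvSpliceSorted [] = PySem.List.sorted (PySem.Set.ofList xs) (fun x => x) := by
  obtain ⟨p, q⟩ := foldl_splice_invariant xs [] (by simp) (by simpa using hnd)
  simp only [List.nil_append] at p
  have hx : xs.Perm (PySem.Set.ofList xs) :=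
    (List.perm_ext_iff_of_nodup hnd (PySem.Set.nodup_ofList xs)).mpr
      (fun a => (PySem.Set.mem_ofList xs a).symm)
  exact (PySem.List.sorted_eq_of_perm_of_pairwise_lt _ _ _ (p.trans hx) q).symm

-- getD of B's insertion loop: the spliced fold of the group's exact codes
theorem getD_foldl_splice (l : List (String × String)) (d : PySem.Dict String (List String)) (c : String) :
    (l.foldl (fun (d : PySem.Dict String (List String)) p =>
        d.insert p.2 (pvSpliceSorted (d.getD p.2 []) p.1)) d).getD c []
      = ((l.filter (fun p => p.2 == c)).map (fun p => p.1)).foldl pvSpliceSorted (d.getD c []) := by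
  induction l generalizing d with
  | nil => simp
  | cons p t ih =>
    simp only [List.foldl_cons, ih, List.filter_cons]
    by_cases h : c = p.2
    · subst h
      simp
    · have hb : (p.2 == c) = false := beq_false_of_ne (fun e => h e.symm)
      simp [hb, PySem.Dict.getD_insert, h]

theorem group_filter_nodup (target_map : List (String × String)) (c : String)
    (h : (target_map.map (fun p => p.1)).Nodup) :
    (((target_map.filter (fun p => p.2 == c)).map (fun p => p.1))).Nodup := by
  have hs : (target_map.filter (fun p => p.2 == c)).Sublist target_map := List.filter_sublist
  exact (hs.map (fun p => p.1)).nodup h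

-- ===== VERDICT (by name: the statement is the Claim_ definition above) =====
theorem group_target_codes_by_canonical_spec : Claim_equal_group_target_codes_by_canonical := by
  intro target_map _ hpre
  unfold Spec_group_target_codes_by_canonical
  unfold group_target_codes_by_canonical group_target_codes_by_canonical_alt
  -- rewrite A's loop (key p.2) as a loop over swapped pairs (key p.1) to use the library lemmas
  have hA_keys :
      (target_map.foldl (fun (d : PySem.Dict String (List String)) p =>
          d.modify p.2 [] (fun xs => xs ++ [p.1])) PySem.Dict.empty).keys
        = PySem.Set.update (PySem.Dict.empty : PySem.Dict String (List String)).keys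
            (target_map.map (fun p => p.2)) :=
    PySem.Dict.keys_foldl_modify_key target_map (fun p => p.2) [] (fun _ p xs => xs ++ [p.1]) _
  have hB_keys :
      (target_map.foldl (fun (d : PySem.Dict String (List String)) p =>
          d.insert p.2 (pvSpliceSorted (d.getD p.2 []) p.1)) PySem.Dict.empty).keys
        = PySem.Set.update (PySem.Dict.empty : PySem.Dict String (List String)).keys
            (target_map.map (fun p => p.2)) :=
    PySem.Dict.keys_foldl_insert_key target_map (fun p => p.2) (fun d p => pvSpliceSorted (d.getD p.2 []) p.1) _
  have hA_nd :
      (target_map.foldl (fun (d : PySem.Dict String (List String)) p =>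
          d.modify p.2 [] (fun xs => xs ++ [p.1])) PySem.Dict.empty).keys.Nodup :=
    PySem.Dict.nodup_keys_foldl_modify_key target_map (fun p => p.2) [] _ _ (by simp)
  have hB_nd :
      (target_map.foldl (fun (d : PySem.Dict String (List String)) p =>
          d.insert p.2 (pvSpliceSorted (d.getD p.2 []) p.1)) PySem.Dict.empty).keys.Nodup :=
    PySem.Dict.nodup_keys_foldl_insert_key target_map (fun p => p.2) _ _ (by simp)
  have hA_getD : ∀ c,
      (target_map.foldl (fun (d : PySem.Dict String (List String)) p =>
          d.modify p.2 [] (fun xs => xs ++ [p.1])) PySem.Dict.empty).getD c []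
        = (target_map.filter (fun p => p.2 == c)).map (fun p => p.1) := by
    intro c
    have hswap := PySem.Dict.getD_foldl_modify_append (target_map.map (fun p => (p.2, p.1)))
      (PySem.Dict.empty : PySem.Dict String (List String)) c
    rw [List.foldl_map] at hswap
    simpa [List.filter_map, Function.comp] using hswap
  rw [PySem.Dict.items_eq_map_keys _ hA_nd [], PySem.Dict.items_eq_map_keys _ hB_nd [],
      hA_keys, hB_keys, List.map_map]
  refine List.map_congr_left ?_
  intro c _
  simp only [Function.comp]
  rw [hA_getD c, getD_foldl_splice]
  have := foldl_splice_eq_sorted_ofList ((target_map.filter (fun p => p.2 == c)).map (fun p => p.1))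
    (group_filter_nodup target_map c hpre)
  simp [this]
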